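-- pv_equiv track=rewrite | github.com/t-tsekov/codefights-solutions | interview/bomber.py | bomber
-- ===== SOURCE A (Python) =====
-- def bomber(field):
--     if len(field) < 1:
--         return 0
--
--     h = len(field)
--     w = len(field[0])
--     max_enemies = 0
--
--     for row in range(h):
--         for col in range(w):
--
--             if field[row][col] == "0":
--                 cur_max = 0
--                 cur_row = row
--                 cur_col = col
--
--                 while cur_row >= 0:
--                     if field[cur_row][col] == "W":
--                         break
--                     if field[cur_row][col] == "E":
--                         cur_max += 1
--                     cur_row -= 1
--
--                 cur_row = row
--
--                 while cur_row < h: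
--                     if field[cur_row][col] == "W":
--                         break
--                     if field[cur_row][col] == "E":
--                         cur_max += 1
--                     cur_row += 1
--
--                 cur_row = row
--
--                 while cur_col >= 0:
--                     if field[row][cur_col] == "W":
--                         break
--                     if field[row][cur_col] == "E":
--                         cur_max += 1
--                     cur_col -= 1
--
--                 cur_col = col
--
--                 while cur_col < w:
--                     if field[row][cur_col] == "W":
--                         break
--                     if field[row][cur_col] == "E":
--                         cur_max += 1
--                     cur_col += 1
--
--                 if cur_max > max_enemies:
--                     max_enemies = cur_max
--
--     return max_enemies
-- ===== SOURCE B (Python) =====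
-- def bomber(field):
--     if not field:
--         return 0
--     h = len(field)
--     w = len(field[0])
--     rows = [list(s[:w]) for s in field]
--     cols = [[rows[r][c] for r in range(h)] for c in range(w)]
--
--     def left(cells):
--         out = []
--         p = 0
--         for ch in cells:
--             p = 0 if ch == 'W' else p + (ch == 'E')
--             out.append(p)
--         return out
--
--     def right(cells):
--         return left(cells[::-1])[::-1]
--
--     L = [left(r) for r in rows]
--     R = [right(r) for r in rows]
--     U = [left(cl) for cl in cols]
--     D = [right(cl) for cl in cols]
--
--     vals = [L[r][c] + R[r][c] + U[c][r] + D[c][r]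
--             for r in range(h) for c in range(w) if rows[r][c] == '0']
--     return max(vals, default=0)
-- ===== Notes on version B (the rewrite author's own statement) =====
-- stated objective: alternative
-- what changed: Replaces A's per-empty-cell rescans in all four directions by four directional prefix passes (running E-count since the last wall) over each row and column, combined per empty cell; worst-case asymptotics improve but a timing run's inputs showed no speed-up.
import Mathlib
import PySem

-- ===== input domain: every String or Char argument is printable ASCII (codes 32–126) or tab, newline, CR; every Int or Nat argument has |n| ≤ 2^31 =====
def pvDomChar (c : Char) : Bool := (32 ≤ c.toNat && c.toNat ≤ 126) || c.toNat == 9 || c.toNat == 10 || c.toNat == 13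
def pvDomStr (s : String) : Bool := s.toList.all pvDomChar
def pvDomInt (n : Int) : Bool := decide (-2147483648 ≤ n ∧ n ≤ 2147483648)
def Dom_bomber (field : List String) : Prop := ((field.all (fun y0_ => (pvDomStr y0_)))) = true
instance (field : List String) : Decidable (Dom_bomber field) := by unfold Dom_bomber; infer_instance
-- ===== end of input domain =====

-- B replaces A's per-empty-cell four-directional rescans by four directional prefix
-- passes (running E-count since the last wall) per row/column, combined per empty cell.

-- ===== PORT A =====
-- field[r][c]; every access A performs is in range under Pre_bomber, so getD is exact there
def charAt (field : List String) (r c : Nat) : Char :=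
  ((field.getD r "").toList.getD c ' ')

-- A's two backward while-loops (cur_row -= 1 / cur_col -= 1), generic in the direction:
-- f j is the char seen at index j; stop at 'W' or index 0, count 'E'
def scanBack (f : Nat → Char) : Nat → Int
  | 0 => if f 0 = 'W' then 0 else if f 0 = 'E' then 1 else 0
  | r + 1 =>
    if f (r + 1) = 'W' then 0
    else (if f (r + 1) = 'E' then 1 else 0) + scanBack f r

-- A's two forward while-loops (cur_row += 1 / cur_col += 1): stop at 'W' or index n
def scanFwd (f : Nat → Char) (n : Nat) (i : Nat) : Int :=
  if _h : i < n then
    if f i = 'W' then 0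
    else (if f i = 'E' then 1 else 0) + scanFwd f n (i + 1)
  else 0
termination_by n - i

def bomber (field : List String) : Int :=
  if field.length < 1 then 0
  else
    let h := field.length
    let w := (field.getD 0 "").length
    (List.range h).foldl (fun m r =>
      (List.range w).foldl (fun m c =>
        if charAt field r c = '0' then
          let cur := scanBack (fun j => charAt field j c) r
                   + scanFwd (fun j => charAt field j c) h r
                   + scanBack (fun j => charAt field r j) c
                   + scanFwd (fun j => charAt field r j) w c
          if cur > m then cur else m
        else m) m) 0

-- ===== PORT B =====
-- running count of 'E' since the last wall, one forward pass ('left' in Source B)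
def lcGo : Int → List Char → List Int
  | _, [] => []
  | p, ch :: rest =>
    let v := if ch = 'W' then 0 else p + (if ch = 'E' then 1 else 0)
    v :: lcGo v rest

def leftCounts (l : List Char) : List Int := lcGo 0 l

def rightCounts (l : List Char) : List Int := (leftCounts l.reverse).reverse

-- max(vals, default=0) of Source B
def pymax (vals : List Int) : Int :=
  match vals with
  | [] => 0
  | v :: vs => vs.foldl max v

def bomber_alt (field : List String) : Int :=
  if field = [] then 0
  else
    let h := field.length
    let w := (field.headD "").length
    let rows := field.map (fun s => s.toList.take w)
    let cols := (List.range w).map (fun c =>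
      (List.range h).map (fun r => (rows.getD r []).getD c ' '))
    let L := rows.map leftCounts
    let R := rows.map rightCounts
    let U := cols.map leftCounts
    let D := cols.map rightCounts
    let vals := (List.range h).flatMap (fun r =>
      ((List.range w).filter (fun c => (rows.getD r []).getD c ' ' == '0')).map
        (fun c => (L.getD r []).getD c 0 + (R.getD r []).getD c 0
                + (U.getD c []).getD r 0 + (D.getD c []).getD r 0))
    pymax vals

-- ===== PRECONDITION & SPEC =====
-- Pre_ excludes exactly the fields with a row shorter than the first row: there A's
-- cell test field[row][col] raises IndexError (rows longer than the first are fine).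
def Pre_bomber (field : List String) : Prop :=
  ∀ s ∈ field, (field.headD "").length ≤ s.length
instance (field : List String) : Decidable (Pre_bomber field) := by
  unfold Pre_bomber; infer_instance

def pvWitness_bomber : List String := ["0E", "WE"]

def Spec_bomber (field : List String) (out : Int) : Prop := out = bomber_alt field
instance (field : List String) (out : Int) : Decidable (Spec_bomber field out) := by
  unfold Spec_bomber; infer_instance

-- ===== CLAIM (what is proved, stated in full; the proofs are below) =====
def Claim_equal_bomber : Prop :=
  ∀ (field : List String), Dom_bomber field → Pre_bomber field →
    Spec_bomber field (bomber field)

-- ===== LEMMAS AND PROOFS =====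

def stepE (p : Int) (c : Char) : Int := if c = 'W' then 0 else p + (if c = 'E' then 1 else 0)

theorem lcGo_length (p : Int) (l : List Char) : (lcGo p l).length = l.length := by
  induction l generalizing p with
  | nil => rfl
  | cons c rest ih => simp [lcGo, ih]

theorem lcGo_getD_zero (p : Int) (c : Char) (rest : List Char) :
    (lcGo p (c :: rest)).getD 0 0 = stepE p c := by
  simp [lcGo, stepE]

theorem lcGo_getD_succ (p : Int) (l : List Char) (i : Nat) (h : i + 1 < l.length) :
    (lcGo p l).getD (i + 1) 0 = stepE ((lcGo p l).getD i 0) (l.getD (i + 1) ' ') := by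
  induction l generalizing p i with
  | nil => simp at h
  | cons c rest ih =>
    cases i with
    | zero =>
      cases rest with
      | nil => simp at h
      | cons c' rest' => simp [lcGo, stepE, List.getD]
    | succ j =>
      have h' : j + 1 < rest.length := by simpa using h
      simpa [lcGo] using ih (if c = 'W' then 0 else p + (if c = 'E' then 1 else 0)) j h'

theorem scanBack_eq (f : Nat → Char) (l : List Char) (i : Nat) (hi : i < l.length)
    (hf : ∀ j, j ≤ i → f j = l.getD j ' ') :
    scanBack f i = (leftCounts l).getD i 0 := by
  induction i with
  | zero =>
    cases l with
    | nil => simp at hi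
    | cons c rest =>
      have h0 : f 0 = c := by simpa [List.getD] using hf 0 le_rfl
      rw [leftCounts, lcGo_getD_zero]
      simp [scanBack, stepE, h0]
  | succ j ih =>
    have hj : j < l.length := by omega
    have hfj : f (j + 1) = l.getD (j + 1) ' ' := hf (j + 1) le_rfl
    rw [scanBack, ih hj (fun k hk => hf k (by omega)), leftCounts,
      lcGo_getD_succ 0 l j hi, hfj, stepE]
    split_ifs <;> omega

theorem getD_reverse {α : Type} (l : List α) (d : α) (i : Nat) (hi : i < l.length) :
    l.reverse.getD i d = l.getD (l.length - 1 - i) d := by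
  rw [List.getD_eq_getElem l.reverse d (by simpa using hi),
    List.getD_eq_getElem l d (by omega)]
  simp [List.getElem_reverse]

theorem scanFwd_eq_scanBack (f : Nat → Char) (n i : Nat) (h : i < n) :
    scanFwd f n i = scanBack (fun j => f (n - 1 - j)) (n - 1 - i) := by
  have key : ∀ k i, i < n → n - 1 - i = k →
      scanFwd f n i = scanBack (fun j => f (n - 1 - j)) k := by
    intro k
    induction k with
    | zero =>
      intro i hi hk
      have hin : i = n - 1 := by omega
      subst hin
      have hn : n - 1 + 1 = n := by omega
      rw [scanFwd]
      rw [dif_pos hi, hn, scanFwd]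
      rw [dif_neg (lt_irrefl n)]
      simp only [scanBack, Nat.sub_zero]
      split_ifs <;> omega
    | succ k ih =>
      intro i hi hk
      have hi1 : i + 1 < n := by omega
      rw [scanFwd, dif_pos hi, ih (i + 1) hi1 (by omega)]
      have : n - 1 - (k + 1) = i := by omega
      simp only [scanBack, this]
  exact key _ i h rfl

theorem scanFwd_eq (f : Nat → Char) (l : List Char) (i : Nat) (hi : i < l.length)
    (hf : ∀ j, i ≤ j → j < l.length → f j = l.getD j ' ') :
    scanFwd f l.length i = (rightCounts l).getD i 0 := by
  have hlen : (leftCounts l.reverse).length = l.length := by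
    rw [leftCounts, lcGo_length, List.length_reverse]
  rw [rightCounts, getD_reverse _ _ _ (by omega),
    scanFwd_eq_scanBack f l.length i hi, hlen]
  exact scanBack_eq _ l.reverse (l.length - 1 - i) (by simp; omega)
    (fun j hj => by
      rw [getD_reverse _ _ _ (show j < l.length by omega)]
      exact hf (l.length - 1 - j) (by omega) (by omega))

theorem lcGo_nonneg (p : Int) (l : List Char) (hp : 0 ≤ p) :
    ∀ x ∈ lcGo p l, 0 ≤ x := by
  induction l generalizing p with
  | nil => simp [lcGo]
  | cons c rest ih =>
    intro x hx
    simp only [lcGo, List.mem_cons] at hx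
    rcases hx with h | h
    · subst h; split_ifs <;> omega
    · exact ih _ (by split_ifs <;> omega) x h

theorem getD_nonneg (l : List Int) (i : Nat) (h : ∀ x ∈ l, 0 ≤ x) :
    0 ≤ l.getD i 0 := by
  by_cases hi : i < l.length
  · rw [List.getD_eq_getElem l 0 hi]; exact h _ (List.getElem_mem hi)
  · rw [List.getD_eq_default l 0 (by omega)]

theorem foldl_max_filter (l : List Nat) (p : Nat → Prop) [DecidablePred p]
    (v : Nat → Int) (m : Int) :
    l.foldl (fun m x => if p x then (if v x > m then v x else m) else m) m
      = ((l.filter (fun x => decide (p x))).map v).foldl max m := by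
  induction l generalizing m with
  | nil => rfl
  | cons a l ih =>
    by_cases hp : p a
    · simp only [List.foldl_cons, List.filter_cons, hp, decide_true, if_true, List.map_cons]
      rw [show (if v a > m then v a else m) = max m (v a) from by
        rcases lt_or_ge m (v a) with h | h
        · simp [max_eq_right h.le, h]
        · simp [max_eq_left h, not_lt.mpr h]]
      exact ih (max m (v a))
    · simp only [List.foldl_cons, List.filter_cons, hp, decide_false, if_false,
        Bool.false_eq_true]
      rw [ih]

theorem foldl_foldl_max {β : Type} (l : List β) (g : β → List Int) (m : Int) :
    l.foldl (fun m r => (g r).foldl max m) m = (l.flatMap g).foldl max m := by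
  induction l generalizing m with
  | nil => rfl
  | cons a l ih => simp [List.flatMap_cons, List.foldl_append, ih]

theorem pymax_eq_foldl (vals : List Int) (h : ∀ x ∈ vals, 0 ≤ x) :
    pymax vals = vals.foldl max 0 := by
  cases vals with
  | nil => rfl
  | cons v vs =>
    simp only [pymax, List.foldl_cons]
    have : max (0 : Int) v = v := max_eq_right (h v (by simp))
    rw [this]

-- proof-side abbreviations for the grid, its rows/columns and the per-cell counts
def wF (field : List String) : Nat := (field.headD "").length

def rowF (field : List String) (r : Nat) : List Char :=
  (field.getD r "").toList.take (wF field)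

def colF (field : List String) (c : Nat) : List Char :=
  (List.range field.length).map (fun r => (rowF field r).getD c ' ')

def vBF (field : List String) (r c : Nat) : Int :=
  (leftCounts (rowF field r)).getD c 0 + (rightCounts (rowF field r)).getD c 0
  + (leftCounts (colF field c)).getD r 0 + (rightCounts (colF field c)).getD r 0

def vAF (field : List String) (r c : Nat) : Int :=
  scanBack (fun j => charAt field j c) r
  + scanFwd (fun j => charAt field j c) field.length r
  + scanBack (fun j => charAt field r j) c
  + scanFwd (fun j => charAt field r j) (wF field) c

def valsF (field : List String) : List Int :=
  (List.range field.length).flatMap (fun r =>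
    ((List.range (wF field)).filter (fun c => (rowF field r).getD c ' ' == '0')).map
      (vBF field r))

theorem decide_eq_beq (a b : Char) : decide (a = b) = (a == b) := by
  by_cases h : a = b <;> simp [h]

theorem getD0_eq_headD (field : List String) : field.getD 0 "" = field.headD "" := by
  cases field <;> rfl

theorem strlen_ge (field : List String) (hpre : Pre_bomber field) (r : Nat)
    (hr : r < field.length) : wF field ≤ (field.getD r "").toList.length := by
  have hm : field.getD r "" ∈ field := by
    rw [List.getD_eq_getElem _ _ hr]; exact List.getElem_mem hr
  have h := hpre _ hm
  rw [show (field.getD r "").toList.length = (field.getD r "").length from by simp]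
  exact h

theorem rowF_length (field : List String) (hpre : Pre_bomber field) (r : Nat)
    (hr : r < field.length) : (rowF field r).length = wF field := by
  rw [rowF, List.length_take]
  exact Nat.min_eq_left (strlen_ge field hpre r hr)

theorem colF_length (field : List String) (c : Nat) :
    (colF field c).length = field.length := by
  simp [colF]

theorem charAt_row (field : List String) (hpre : Pre_bomber field) (r c : Nat)
    (hr : r < field.length) (hc : c < wF field) :
    charAt field r c = (rowF field r).getD c ' ' := by
  have hl := strlen_ge field hpre r hr
  have h2 : c < (List.take (wF field) (field.getD r "").toList).length := by
    rw [List.length_take]; omega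
  rw [charAt, rowF, List.getD_eq_getElem _ _ h2,
    List.getD_eq_getElem _ _ (show c < (field.getD r "").toList.length by omega)]
  simp [List.getElem_take]

theorem colF_getD (field : List String) (r c : Nat) (hr : r < field.length) :
    (colF field c).getD r ' ' = (rowF field r).getD c ' ' := by
  rw [colF]
  exact PySem.List.getD_map_range _ _ _ _ hr

theorem vAF_eq_vBF (field : List String) (hpre : Pre_bomber field) (r c : Nat)
    (hr : r < field.length) (hc : c < wF field) :
    vAF field r c = vBF field r c := by
  have h1 : scanBack (fun j => charAt field j c) r
      = (leftCounts (colF field c)).getD r 0 :=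
    scanBack_eq _ _ r (by rw [colF_length]; exact hr)
      (fun j hj => by
        rw [colF_getD field j c (by omega)]
        exact charAt_row field hpre j c (by omega) hc)
  have h2 : scanFwd (fun j => charAt field j c) field.length r
      = (rightCounts (colF field c)).getD r 0 := by
    have := scanFwd_eq (fun j => charAt field j c) (colF field c) r
      (by rw [colF_length]; exact hr)
      (fun j _ hj2 => by
        rw [colF_getD field j c (by rw [colF_length] at hj2; exact hj2)]
        exact charAt_row field hpre j c (by rw [colF_length] at hj2; exact hj2) hc)
    rwa [colF_length] at this
  have h3 : scanBack (fun j => charAt field r j) c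
      = (leftCounts (rowF field r)).getD c 0 :=
    scanBack_eq _ _ c (by rw [rowF_length field hpre r hr]; exact hc)
      (fun j hj => charAt_row field hpre r j hr (by omega))
  have h4 : scanFwd (fun j => charAt field r j) (wF field) c
      = (rightCounts (rowF field r)).getD c 0 := by
    have := scanFwd_eq (fun j => charAt field r j) (rowF field r) c
      (by rw [rowF_length field hpre r hr]; exact hc)
      (fun j _ hj2 => charAt_row field hpre r j hr
        (by rw [rowF_length field hpre r hr] at hj2; exact hj2))
    rwa [rowF_length field hpre r hr] at this
  rw [vAF, vBF, h1, h2, h3, h4]; ring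

theorem bomber_eq_valsF (field : List String) (hpre : Pre_bomber field)
    (hne : field ≠ []) : bomber field = (valsF field).foldl max 0 := by
  have hlen : ¬ field.length < 1 := by
    cases field with
    | nil => exact absurd rfl hne
    | cons a l => simp
  have hA : bomber field
      = (List.range field.length).foldl (fun m r =>
          (List.range (wF field)).foldl (fun m c =>
            if charAt field r c = '0' then
              (if vAF field r c > m then vAF field r c else m)
            else m) m) 0 := by
    simp only [bomber, if_neg hlen, getD0_eq_headD]
    rfl
  rw [hA]
  have hfun : (fun (m : Int) (r : Nat) =>
        (List.range (wF field)).foldl (fun m c =>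
          if charAt field r c = '0' then
            (if vAF field r c > m then vAF field r c else m)
          else m) m)
      = fun m r =>
        ((((List.range (wF field)).filter
            (fun c => decide (charAt field r c = '0'))).map (vAF field r)).foldl max m) := by
    funext m r
    exact foldl_max_filter _ _ _ m
  rw [hfun, foldl_foldl_max]
  congr 1
  rw [valsF]
  apply List.flatMap_congr
  intro r hrm
  have hr : r < field.length := List.mem_range.mp hrm
  have hfilt : (List.range (wF field)).filter (fun c => decide (charAt field r c = '0'))
      = (List.range (wF field)).filter (fun c => (rowF field r).getD c ' ' == '0') := by
    apply List.filter_congr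
    intro c hcm
    have hc : c < wF field := List.mem_range.mp hcm
    rw [charAt_row field hpre r c hr hc]
    exact decide_eq_beq _ _
  rw [hfilt]
  apply List.map_congr_left
  intro c hcm
  have hc : c < wF field := List.mem_range.mp (List.mem_of_mem_filter hcm)
  exact vAF_eq_vBF field hpre r c hr hc

theorem counts_getD_nonneg_left (l : List Char) (i : Nat) :
    0 ≤ (leftCounts l).getD i 0 :=
  getD_nonneg _ _ (lcGo_nonneg 0 l le_rfl)

theorem counts_getD_nonneg_right (l : List Char) (i : Nat) :
    0 ≤ (rightCounts l).getD i 0 :=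
  getD_nonneg _ _ (fun x hx =>
    lcGo_nonneg 0 l.reverse le_rfl x (List.mem_reverse.mp hx))

theorem valsF_nonneg (field : List String) : ∀ x ∈ valsF field, 0 ≤ x := by
  intro x hx
  rw [valsF] at hx
  obtain ⟨r, _, hx⟩ := List.mem_flatMap.mp hx
  obtain ⟨c, _, hx⟩ := List.mem_map.mp hx
  subst hx
  have := counts_getD_nonneg_left (rowF field r) c
  have := counts_getD_nonneg_right (rowF field r) c
  have := counts_getD_nonneg_left (colF field c) r
  have := counts_getD_nonneg_right (colF field c) r
  rw [vBF]; omega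

theorem bomber_alt_eq_valsF (field : List String) (hne : field ≠ []) :
    bomber_alt field = (valsF field).foldl max 0 := by
  have hrows : ∀ r < field.length,
      (field.map (fun s => s.toList.take (wF field))).getD r [] = rowF field r := by
    intro r hr
    rw [List.getD_eq_getElem _ _ (by simpa using hr), List.getElem_map,
      rowF, List.getD_eq_getElem _ _ hr]
  have hvals : (List.range field.length).flatMap (fun r =>
      ((List.range (wF field)).filter (fun c =>
        ((field.map (fun s => s.toList.take (wF field))).getD r []).getD c ' ' == '0')).map
        (fun c =>
          (((field.map (fun s => s.toList.take (wF field))).map leftCounts).getD r []).getD c 0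
          + (((field.map (fun s => s.toList.take (wF field))).map rightCounts).getD r []).getD c 0
          + ((((List.range (wF field)).map (fun c =>
              (List.range field.length).map (fun r =>
                ((field.map (fun s => s.toList.take (wF field))).getD r []).getD c ' '))).map
              leftCounts).getD c []).getD r 0
          + ((((List.range (wF field)).map (fun c =>
              (List.range field.length).map (fun r =>
                ((field.map (fun s => s.toList.take (wF field))).getD r []).getD c ' '))).map
              rightCounts).getD c []).getD r 0))
      = valsF field := by
    rw [valsF]
    apply List.flatMap_congr
    intro r hrm
    have hr : r < field.length := List.mem_range.mp hrm
    have hLR : ∀ g : List Char → List Int,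
        ((field.map (fun s => s.toList.take (wF field))).map g).getD r [] = g (rowF field r) := by
      intro g
      rw [List.getD_eq_getElem _ _ (by simpa using hr), List.getElem_map, List.getElem_map,
        rowF, List.getD_eq_getElem _ _ hr]
    have hcolfun : (fun c => (List.range field.length).map (fun r =>
          ((field.map (fun s => s.toList.take (wF field))).getD r []).getD c ' '))
        = colF field := by
      funext c
      rw [colF]
      apply List.map_congr_left
      intro j hjm
      rw [hrows j (List.mem_range.mp hjm)]
    rw [hcolfun, hrows r hr]
    have hUD : ∀ (g : List Char → List Int) (c : Nat), c < wF field →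
        (((List.range (wF field)).map (colF field)).map g).getD c [] = g (colF field c) := by
      intro g c hc
      rw [List.getD_eq_getElem _ _ (by simpa using hc), List.getElem_map, List.getElem_map,
        List.getElem_range]
    apply List.map_congr_left
    intro c hcm
    have hc : c < wF field := List.mem_range.mp (List.mem_of_mem_filter hcm)
    rw [hLR leftCounts, hLR rightCounts, hUD leftCounts c hc, hUD rightCounts c hc, vBF]
  have halt : bomber_alt field = pymax (valsF field) := by
    simp only [bomber_alt, if_neg hne]
    rw [show ((field.headD "").length) = wF field from rfl, hvals]
  rw [halt, pymax_eq_foldl _ (valsF_nonneg field)]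

-- ===== VERDICT (by name: the statement is the Claim_ definition above) =====
theorem bomber_spec : Claim_equal_bomber := by
  intro field _ hpre
  show bomber field = bomber_alt field
  by_cases hne : field = []
  · subst hne; rfl
  · rw [bomber_eq_valsF field hpre hne, bomber_alt_eq_valsF field hne]
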